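-- pv_equiv track=rewrite | github.com/element-hq/ess-helm | packages/ess-migration-tool/src/ess_migration_tool/utils.py | sort_tracked_values_for_filtering
-- ===== SOURCE A (Python) =====
-- from collections import defaultdict
--
-- def parse_path(path: str) -> list[str]:
--     """
--     Parse a path string that may contain single-quoted keys with dots.
--
--     Single-quoted keys are treated as single path components even if they contain dots.
--     This allows keys containing dots to be used in paths by wrapping them in single quotes.
--
--     Examples:
--         'a.b.c' -> ['a', 'b', 'c']
--         "a.'my.key'.b" -> ['a', 'my.key', 'b']
--         "a.'foo.bar'.'baz.mux'" -> ['a', 'foo.bar', 'baz.mux']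
--         'a.b.' → ['a', 'b', '']
--
--     Args:
--         path: Path string, potentially containing single-quoted components
--
--     Returns:
--         List of path components, with quoted parts preserving their dots
--     """
--     if not path:
--         return []
--
--     parts: list[str] = []
--     current_part: list[str] = []
--     in_quotes = False
--
--     for char in path:
--         if char == "'":
--             # Toggle quotes
--             in_quotes = not in_quotes
--         elif char == "." and not in_quotes:
--             # End of current part (only split on dots outside quotes)
--             parts.append("".join(current_part))
--             current_part = []
--             continue
--         else:
--             current_part.append(char)
--
--     # Add the last part
--     parts.append("".join(current_part))
--
--     return parts
--
-- def sort_tracked_values_for_filtering(tracked_values: list[str]) -> list[str]: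
--     """
--     Sort tracked values so that list indices are processed in descending order.
--     This prevents the list shifting problem when removing indices sequentially.
--     Supports single-quoted keys containing dots (e.g., "a.'my.key'.0").
--
--     For example: ['secrets.keys.0', 'secrets.keys.1', 'secrets.keys.2'] ->
--     ['secrets.keys.2', 'secrets.keys.1', 'secrets.keys.0']
--
--     Args:
--         tracked_values: List of dot-separated config paths. Use single quotes
--               to wrap keys containing dots (e.g., "a.'my.key'.0")
--
--     Returns:
--         Sorted list of paths with list indices in descending order within each parent
--     """
--     # Separate paths: regular paths and paths ending with numeric indices
--     regular_paths = []
--     indexed_paths_by_parent: dict[str, list] = defaultdict(list)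
--
--     for path in tracked_values:
--         parsed_parts = parse_path(path)
--         if len(parsed_parts) >= 1 and parsed_parts[-1].isdigit():
--             # This is a list index path like 'secrets.keys.2' or 'secrets.'my.key'.2'
--             # Reconstruct parent path from all parts except the last
--             parent_parts = parsed_parts[:-1]
--             parent = ".".join(parent_parts)
--             index = parsed_parts[-1]
--             indexed_paths_by_parent[parent].append((int(index), path))
--         else:
--             regular_paths.append(path)
--
--     # Sort indexed paths by parent (sorted for determinism), then by index descending
--     sorted_indexed: list[str] = []
--     for parent in sorted(indexed_paths_by_parent.keys()):
--         sorted_indexed.extend(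
--             path for _, path in sorted(indexed_paths_by_parent[parent], key=lambda x: x[0], reverse=True)
--         )
--
--     return regular_paths + sorted_indexed
-- ===== SOURCE B (Python) =====
-- def parse_path(path: str) -> list[str]:
--     if not path:
--         return []
--     parts: list[str] = []
--     current_part: list[str] = []
--     in_quotes = False
--     for char in path:
--         if char == "'":
--             in_quotes = not in_quotes
--         elif char == "." and not in_quotes:
--             parts.append("".join(current_part))
--             current_part = []
--             continue
--         else:
--             current_part.append(char)
--     parts.append("".join(current_part))
--     return parts
--
--
-- def sort_tracked_values_for_filtering(tracked_values: list[str]) -> list[str]: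
--     # One flat stable sort with a composite key instead of dict grouping +
--     # per-parent sorts: decorate each indexed path with (parent, -index).
--     def decorate(path):
--         parts = parse_path(path)
--         if len(parts) >= 1 and parts[-1].isdigit():
--             return (".".join(parts[:-1]), -int(parts[-1]), path)
--         return None
--
--     regular = [p for p in tracked_values if decorate(p) is None]
--     indexed = sorted(
--         (decorate(p) for p in tracked_values if decorate(p) is not None),
--         key=lambda t: (t[0], t[1]),
--     )
--     return regular + [t[2] for t in indexed]
-- ===== Notes on version B (the rewrite author's own statement) =====
-- stated objective: alternative
-- what changed: Replaces A's defaultdict grouping plus per-parent descending sorts (iterating sorted dict keys) with one classification pass and a single flat stable sort of the indexed paths by the composite key (parent, -index).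
import Mathlib
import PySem

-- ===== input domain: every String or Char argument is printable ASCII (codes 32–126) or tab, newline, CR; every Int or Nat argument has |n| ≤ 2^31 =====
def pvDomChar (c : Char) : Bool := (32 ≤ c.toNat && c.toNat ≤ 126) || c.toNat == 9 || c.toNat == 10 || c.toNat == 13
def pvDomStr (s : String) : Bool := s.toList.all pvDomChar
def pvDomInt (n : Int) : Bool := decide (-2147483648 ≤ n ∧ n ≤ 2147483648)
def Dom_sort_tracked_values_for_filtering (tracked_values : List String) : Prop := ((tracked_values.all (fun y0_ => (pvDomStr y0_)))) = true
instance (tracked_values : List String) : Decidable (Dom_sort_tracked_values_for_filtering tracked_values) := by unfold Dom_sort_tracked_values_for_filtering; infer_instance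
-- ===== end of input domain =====

-- B replaces A's defaultdict grouping + per-parent descending sorts with one
-- classification pass and a single flat stable sort by the composite key
-- (parent, -index); equal return value on every input, proved below.


-- ===== PORT A =====
-- shared helper of both Pythons (B's parse_path is textually identical to A's)
def parse_path (path : String) : List String :=
  if path = "" then []
  else
    let st := path.toList.foldl
      (fun (st : List String × List Char × Bool) c =>
        if c = '\'' then (st.1, st.2.1, !st.2.2)
        else if c = '.' && !st.2.2 then (st.1 ++ [String.ofList st.2.1], ([] : List Char), st.2.2)
        else (st.1, st.2.1 ++ [c], st.2.2))
      ([], [], false)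
    st.1 ++ [String.ofList st.2.1]

-- int(index) is guarded by isdigit, under which ofStr? is some; the getD 0 default is never taken
def sort_tracked_values_for_filtering (tracked_values : List String) : List String :=
  let st := tracked_values.foldl
    (fun (st : List String × PySem.Dict String (List (Int × String))) path =>
      let parts := parse_path path
      if decide (1 ≤ parts.length) && PySem.Str.strIsdigit ((PySem.List.pyGet? parts (-1)).getD "") then
        let parent := PySem.Str.join "." (PySem.List.slice parts none (some (-1)))
        let index := (PySem.List.pyGet? parts (-1)).getD ""
        (st.1, st.2.modify parent [] (· ++ [((PySem.Int.ofStr? index).getD 0, path)]))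
      else (st.1 ++ [path], st.2))
    ([], PySem.Dict.empty)
  let sorted_indexed := (PySem.List.sorted st.2.keys (fun k => k)).foldl
    (fun acc parent =>
      acc ++ (PySem.List.sorted (st.2.getD parent []) (fun x => x.1) true).map (fun x => x.2)) []
  st.1 ++ sorted_indexed

-- ===== PORT B =====
def pvDecorate (path : String) : Option (String × Int × String) :=
  let parts := parse_path path
  if decide (1 ≤ parts.length) && PySem.Str.strIsdigit ((PySem.List.pyGet? parts (-1)).getD "") then
    some (PySem.Str.join "." (PySem.List.slice parts none (some (-1))),
          -((PySem.Int.ofStr? ((PySem.List.pyGet? parts (-1)).getD "")).getD 0), path)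
  else none

def sort_tracked_values_for_filtering_alt (tracked_values : List String) : List String :=
  let regular := tracked_values.filter (fun p => (pvDecorate p).isNone)
  let indexed := PySem.List.sorted2 (tracked_values.filterMap pvDecorate)
      (fun t => t.1) (fun t => t.2.1)
  regular ++ indexed.map (fun t => t.2.2)

-- ===== PRECONDITION & SPEC =====
def Spec_sort_tracked_values_for_filtering (tracked_values : List String) (out : List String) : Prop := out = sort_tracked_values_for_filtering_alt tracked_values
instance (tracked_values : List String) (out : List String) : Decidable (Spec_sort_tracked_values_for_filtering tracked_values out) := by unfold Spec_sort_tracked_values_for_filtering; infer_instance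

-- ===== CLAIM (what is proved, stated in full; the proofs are below) =====
def Claim_equal_sort_tracked_values_for_filtering : Prop := ∀ (tracked_values : List String), Dom_sort_tracked_values_for_filtering tracked_values → Spec_sort_tracked_values_for_filtering tracked_values (sort_tracked_values_for_filtering tracked_values)

-- ===== LEMMAS AND PROOFS =====

-- A's big comparison boolean of sorted2 under the keys (parent, -index)
def pvB2 (a b : String × Int × String) : Bool :=
  decide (a.1 < b.1) || (!decide (b.1 < a.1) && decide (a.2.1 < b.2.1))

theorem pvB2_false (x y : String × Int × String) (h : y.1 < x.1) : pvB2 x y = false := by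
  simp only [pvB2, decide_eq_true h, decide_eq_false (lt_asymm h)]
  rfl

theorem pvB2_true (x y : String × Int × String) (h : x.1 < y.1) : pvB2 x y = true := by
  simp only [pvB2, decide_eq_true h, Bool.true_or]

theorem pvB2_eqk (x y : String × Int × String) (h : y.1 = x.1) :
    pvB2 x y = decide (x.2.1 < y.2.1) := by
  simp only [pvB2, h, decide_eq_false (lt_irrefl x.1), Bool.not_false, Bool.true_and,
    Bool.false_or]

theorem insertBy_append_left {α : Type} (b : α → α → Bool) (x : α) (l r : List α)
    (h : ∀ y ∈ l, b x y = false) :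
    PySem.List.insertBy b x (l ++ r) = l ++ PySem.List.insertBy b x r := by
  induction l with
  | nil => rfl
  | cons z l ih =>
    simp only [List.cons_append, PySem.List.insertBy, h z (by simp)]
    simp only [Bool.false_eq_true, if_false, List.cons_inj_right]
    exact ih (fun y hy => h y (by simp [hy]))

theorem insertBy_append_right {α : Type} (b : α → α → Bool) (x : α) (l r : List α)
    (h : ∀ y ∈ r, b x y = true) :
    PySem.List.insertBy b x (l ++ r) = PySem.List.insertBy b x l ++ r := by
  induction l with
  | nil =>
    cases r with
    | nil => rfl
    | cons z r => simp [PySem.List.insertBy, h z (by simp)]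
  | cons z l ih =>
    simp only [List.cons_append, PySem.List.insertBy]
    cases hb : b x z <;> simp [ih]

theorem insertBy_congr {α : Type} (b b' : α → α → Bool) (x : α) (l : List α)
    (h : ∀ y ∈ l, b x y = b' x y) :
    PySem.List.insertBy b x l = PySem.List.insertBy b' x l := by
  induction l with
  | nil => rfl
  | cons z l ih =>
    simp only [PySem.List.insertBy, h z (by simp)]
    cases hb : b' x z <;> simp
    exact ih (fun y hy => h y (by simp [hy]))

theorem insertBy_map {α β : Type} (f : α → β) (b : β → β → Bool) (b0 : α → α → Bool)
    (h : ∀ x y, b (f x) (f y) = b0 x y) (x : α) (l : List α) :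
    PySem.List.insertBy b (f x) (l.map f) = (PySem.List.insertBy b0 x l).map f := by
  induction l with
  | nil => rfl
  | cons z l ih =>
    simp only [List.map_cons, PySem.List.insertBy, h x z]
    cases hb : b0 x z <;> simp [ih]

theorem foldl_insertBy_map {α β : Type} (f : α → β) (b : β → β → Bool) (b0 : α → α → Bool)
    (h : ∀ x y, b (f x) (f y) = b0 x y) (l : List α) (acc : List α) :
    (l.map f).foldl (fun a x => PySem.List.insertBy b x a) (acc.map f)
      = (l.foldl (fun a x => PySem.List.insertBy b0 x a) acc).map f := by
  induction l generalizing acc with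
  | nil => rfl
  | cons z l ih => simpa [insertBy_map f b b0 h z acc] using ih (PySem.List.insertBy b0 z acc)

theorem pvSorted2_snoc (xs : List (String × Int × String)) (x : String × Int × String) :
    PySem.List.sorted2 (xs ++ [x]) (fun t => t.1) (fun t => t.2.1)
    = PySem.List.insertBy pvB2 x (PySem.List.sorted2 xs (fun t => t.1) (fun t => t.2.1)) := by
  show (xs ++ [x]).foldl (fun acc y => PySem.List.insertBy pvB2 y acc) [] = _
  rw [List.foldl_append]
  rfl

theorem pvSortedK2_snoc (l : List (String × Int × String)) (x : String × Int × String) :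
    PySem.List.sorted (l ++ [x]) (fun t => t.2.1)
    = PySem.List.insertBy (fun a b => decide (a.2.1 < b.2.1)) x
        (PySem.List.sorted l (fun t => t.2.1)) := by
  show (l ++ [x]).foldl (fun acc y => PySem.List.insertBy _ y acc) [] = _
  rw [List.foldl_append]
  rfl

theorem pvSplit_sorted (l : List String) (a : String) (hp : l.Pairwise (· < ·)) (hm : a ∈ l) :
    ∃ L R, l = L ++ a :: R ∧ (∀ y ∈ L, y < a) ∧ (∀ y ∈ R, a < y) := by
  obtain ⟨L, R, rfl⟩ := List.append_of_mem hm
  rw [List.pairwise_append] at hp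
  exact ⟨L, R, rfl, fun y hy => hp.2.2 y hy a (by simp),
    fun y hy => (List.pairwise_cons.mp hp.2.1).1 y hy⟩

theorem pvMem_block (xs : List (String × Int × String)) (p : String)
    (y : String × Int × String)
    (hy : y ∈ PySem.List.sorted (xs.filter (fun t => t.1 == p)) (fun t => t.2.1)) :
    y.1 = p := by
  rw [PySem.List.mem_sorted] at hy
  exact beq_iff_eq.mp (List.mem_filter.mp hy).2

-- THE KEY LEMMA: a single stable sort by the composite key (parent, -index) is
-- grouping by parent (ascending, distinct) with each group stably sorted by -index
theorem pvGP (xs : List (String × Int × String)) :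
    PySem.List.sorted2 xs (fun t => t.1) (fun t => t.2.1)
    = (PySem.List.sorted (PySem.Set.ofList (xs.map (fun t => t.1))) (fun k => k)).flatMap
        (fun p => PySem.List.sorted (xs.filter (fun t => t.1 == p)) (fun t => t.2.1)) := by
  induction xs using List.reverseRecOn with
  | nil => rfl
  | append_singleton xs x ih =>
    have hmsnoc : (xs ++ [x]).map (fun t => t.1) = xs.map (fun t => t.1) ++ [x.1] := by simp
    have hfil : ∀ p : String, x.1 ≠ p →
        (xs ++ [x]).filter (fun t => t.1 == p) = xs.filter (fun t => t.1 == p) := by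
      intro p hne
      have hb : (x.1 == p) = false := beq_eq_false_iff_ne.mpr hne
      rw [List.filter_append]
      simp [List.filter, hb]
    have hfilx : (xs ++ [x]).filter (fun t => t.1 == x.1)
        = xs.filter (fun t => t.1 == x.1) ++ [x] := by
      rw [List.filter_append]
      simp [List.filter]
    by_cases hmem : x.1 ∈ xs.map (fun t => t.1)
    case pos =>
      have hset : PySem.Set.ofList ((xs ++ [x]).map (fun t => t.1))
          = PySem.Set.ofList (xs.map (fun t => t.1)) := by
        rw [hmsnoc, PySem.Set.ofList_eq_foldl, List.foldl_append, ← PySem.Set.ofList_eq_foldl]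
        simp [PySem.Set.add, PySem.Set.contains, PySem.Set.mem_ofList, hmem]
      obtain ⟨L, R, hS, hL, hR⟩ := pvSplit_sorted _ x.1
        (PySem.List.sorted_ofList_pairwise_lt (xs.map (fun t => t.1)))
        (by rw [PySem.List.mem_sorted, PySem.Set.mem_ofList]; exact hmem)
      rw [pvSorted2_snoc, ih, hset, hS]
      rw [List.flatMap_append, List.flatMap_cons, List.flatMap_append, List.flatMap_cons]
      have hblocksL : L.flatMap (fun p => PySem.List.sorted ((xs ++ [x]).filter (fun t => t.1 == p)) (fun t => t.2.1))
          = L.flatMap (fun p => PySem.List.sorted (xs.filter (fun t => t.1 == p)) (fun t => t.2.1)) := by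
        rw [List.flatMap_def, List.flatMap_def,
          List.map_congr_left (fun p hp => by rw [hfil p (ne_of_gt (hL p hp))])]
      have hblocksR : R.flatMap (fun p => PySem.List.sorted ((xs ++ [x]).filter (fun t => t.1 == p)) (fun t => t.2.1))
          = R.flatMap (fun p => PySem.List.sorted (xs.filter (fun t => t.1 == p)) (fun t => t.2.1)) := by
        rw [List.flatMap_def, List.flatMap_def,
          List.map_congr_left (fun p hp => by rw [hfil p (ne_of_lt (hR p hp))])]
      rw [hblocksL, hblocksR, hfilx, pvSortedK2_snoc]
      rw [insertBy_append_left pvB2 x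
        (L.flatMap (fun p => PySem.List.sorted (xs.filter (fun t => t.1 == p)) (fun t => t.2.1)))
        _ (fun y hy => by
          obtain ⟨p, hpL, hyp⟩ := List.mem_flatMap.mp hy
          exact pvB2_false x y (by rw [pvMem_block xs p y hyp]; exact hL p hpL))]
      rw [insertBy_append_right pvB2 x
        (PySem.List.sorted (xs.filter (fun t => t.1 == x.1)) (fun t => t.2.1))
        (R.flatMap (fun p => PySem.List.sorted (xs.filter (fun t => t.1 == p)) (fun t => t.2.1)))
        (fun y hy => by
          obtain ⟨p, hpR, hyp⟩ := List.mem_flatMap.mp hy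
          exact pvB2_true x y (by rw [pvMem_block xs p y hyp]; exact hR p hpR))]
      rw [insertBy_congr pvB2 (fun a b => decide (a.2.1 < b.2.1)) x _
        (fun y hy => pvB2_eqk x y (pvMem_block xs x.1 y hy))]
    case neg =>
      have hset : PySem.Set.ofList ((xs ++ [x]).map (fun t => t.1))
          = PySem.Set.ofList (xs.map (fun t => t.1)) ++ [x.1] := by
        rw [hmsnoc, PySem.Set.ofList_eq_foldl, List.foldl_append, ← PySem.Set.ofList_eq_foldl]
        simp [PySem.Set.add, PySem.Set.contains, PySem.Set.mem_ofList, hmem]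
      have hpairnew : (PySem.List.sorted (PySem.Set.ofList ((xs ++ [x]).map (fun t => t.1))) (fun k => k)).Pairwise (· < ·) :=
        PySem.List.sorted_ofList_pairwise_lt _
      obtain ⟨L, R, hS, hL, hR⟩ := pvSplit_sorted _ x.1 hpairnew
        (by rw [PySem.List.mem_sorted, PySem.Set.mem_ofList, hmsnoc]; simp)
      have hSold : PySem.List.sorted (PySem.Set.ofList (xs.map (fun t => t.1))) (fun k => k) = L ++ R := by
        apply PySem.List.sorted_eq_of_perm_of_pairwise_lt
        · have h1 : (L ++ x.1 :: R).Perm (PySem.Set.ofList (xs.map (fun t => t.1)) ++ [x.1]) := by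
            rw [← hset, ← hS]; exact PySem.List.sorted_perm _ _ _
          have hA : (x.1 :: (L ++ R)).Perm (L ++ x.1 :: R) := List.perm_middle.symm
          have hB : (PySem.Set.ofList (xs.map (fun t => t.1)) ++ [x.1]).Perm
              (x.1 :: PySem.Set.ofList (xs.map (fun t => t.1))) := List.perm_append_singleton _ _
          exact ((hA.trans h1).trans hB).cons_inv
        · have := hpairnew
          rw [hS] at this
          exact this.sublist (List.Sublist.append_left (List.sublist_cons_self _ _) L)
      have hfilxnil : xs.filter (fun t => t.1 == x.1) = [] := by
        rw [List.filter_eq_nil_iff]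
        intro t ht hbt
        exact hmem (List.mem_map.mpr ⟨t, ht, (beq_iff_eq.mp hbt)⟩)
      rw [pvSorted2_snoc, ih, hSold, hS]
      rw [List.flatMap_append, List.flatMap_append, List.flatMap_cons]
      have hblocksL : L.flatMap (fun p => PySem.List.sorted ((xs ++ [x]).filter (fun t => t.1 == p)) (fun t => t.2.1))
          = L.flatMap (fun p => PySem.List.sorted (xs.filter (fun t => t.1 == p)) (fun t => t.2.1)) := by
        rw [List.flatMap_def, List.flatMap_def,
          List.map_congr_left (fun p hp => by rw [hfil p (ne_of_gt (hL p hp))])]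
      have hblocksR : R.flatMap (fun p => PySem.List.sorted ((xs ++ [x]).filter (fun t => t.1 == p)) (fun t => t.2.1))
          = R.flatMap (fun p => PySem.List.sorted (xs.filter (fun t => t.1 == p)) (fun t => t.2.1)) := by
        rw [List.flatMap_def, List.flatMap_def,
          List.map_congr_left (fun p hp => by rw [hfil p (ne_of_lt (hR p hp))])]
      have hbx : PySem.List.sorted ((xs ++ [x]).filter (fun t => t.1 == x.1)) (fun t => t.2.1) = [x] := by
        rw [hfilx, hfilxnil]
        rfl
      rw [hblocksL, hblocksR, hbx]
      rw [insertBy_append_left pvB2 x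
        (L.flatMap (fun p => PySem.List.sorted (xs.filter (fun t => t.1 == p)) (fun t => t.2.1)))
        _ (fun y hy => by
          obtain ⟨p, hpL, hyp⟩ := List.mem_flatMap.mp hy
          exact pvB2_false x y (by rw [pvMem_block xs p y hyp]; exact hL p hpL))]
      have hins : PySem.List.insertBy pvB2 x
          (R.flatMap (fun p => PySem.List.sorted (xs.filter (fun t => t.1 == p)) (fun t => t.2.1)))
          = x :: R.flatMap (fun p => PySem.List.sorted (xs.filter (fun t => t.1 == p)) (fun t => t.2.1)) := by
        have := insertBy_append_right pvB2 x []
          (R.flatMap (fun p => PySem.List.sorted (xs.filter (fun t => t.1 == p)) (fun t => t.2.1)))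
          (fun y hy => by
            obtain ⟨p, hpR, hyp⟩ := List.mem_flatMap.mp hy
            exact pvB2_true x y (by rw [pvMem_block xs p y hyp]; exact hR p hpR))
        simpa using this
      rw [hins]
      simp

-- the condition, parent and index both Pythons compute for one path
def pvCond (path : String) : Bool :=
  decide (1 ≤ (parse_path path).length) &&
    PySem.Str.strIsdigit ((PySem.List.pyGet? (parse_path path) (-1)).getD "")

def pvParent (path : String) : String :=
  PySem.Str.join "." (PySem.List.slice (parse_path path) none (some (-1)))

def pvIdx (path : String) : Int :=
  (PySem.Int.ofStr? ((PySem.List.pyGet? (parse_path path) (-1)).getD "")).getD 0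

def pvTrip (path : String) : String × Int × String := (pvParent path, -(pvIdx path), path)

theorem pvDecorate_eq (p : String) :
    pvDecorate p = if pvCond p then some (pvTrip p) else none := rfl

theorem pvFilterMap_dec (l : List String) :
    l.filterMap pvDecorate = (l.filter pvCond).map pvTrip := by
  induction l with
  | nil => rfl
  | cons x l ih =>
    rw [List.filterMap_cons, List.filter_cons, pvDecorate_eq]
    cases h : pvCond x <;> simp [ih]

-- A's result, written as regular paths ++ grouped flatMap over sorted distinct parents
theorem pvA_eq (tv : List String) :
    sort_tracked_values_for_filtering tv =
      tv.filter (fun p => !pvCond p) ++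
      (PySem.List.sorted
          (PySem.Set.ofList ((tv.filter pvCond).map pvParent)) (fun k => k)).flatMap
        (fun p =>
          (PySem.List.sorted
              (((tv.filter pvCond).filter (fun q => pvParent q == p)).map (fun q => (pvIdx q, q)))
              (fun x => x.1) true).map (fun x => x.2)) := by
  simp only [sort_tracked_values_for_filtering]
  have hfn : (fun (st : List String × PySem.Dict String (List (Int × String))) path =>
      let parts := parse_path path
      if decide (1 ≤ parts.length) && PySem.Str.strIsdigit ((PySem.List.pyGet? parts (-1)).getD "") then
        let parent := PySem.Str.join "." (PySem.List.slice parts none (some (-1)))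
        let index := (PySem.List.pyGet? parts (-1)).getD ""
        (st.1, st.2.modify parent [] (· ++ [((PySem.Int.ofStr? index).getD 0, path)]))
      else (st.1 ++ [path], st.2))
      = (fun st path =>
        ((fun (r : List String) path => if !pvCond path then r ++ [path] else r) st.1 path,
         (fun (d : PySem.Dict String (List (Int × String))) path =>
            if pvCond path then
              d.modify (pvParent path) [] (· ++ [(pvIdx path, path)])
            else d) st.2 path)) := by
    funext st path
    show (if pvCond path then _ else _) = _
    cases h : pvCond path <;> simp [h, pvParent, pvIdx]
  rw [hfn, PySem.List.foldl_prod_mk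
    (f := fun (r : List String) path => if !pvCond path then r ++ [path] else r)
    (g := fun (d : PySem.Dict String (List (Int × String))) path =>
      if pvCond path then d.modify (pvParent path) [] (· ++ [(pvIdx path, path)]) else d)]
  simp only []
  have hreg : tv.foldl (fun (r : List String) path => if !pvCond path then r ++ [path] else r) []
      = tv.filter (fun p => !pvCond p) := by
    simpa using PySem.List.foldl_append_if_eq_filter (fun p => !pvCond p) tv []
  have hdict : tv.foldl (fun (d : PySem.Dict String (List (Int × String))) path =>
        if pvCond path then d.modify (pvParent path) [] (· ++ [(pvIdx path, path)]) else d)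
        PySem.Dict.empty
      = ((tv.filter pvCond).map (fun q => (pvParent q, (pvIdx q, q)))).foldl
          (fun d q => d.modify q.1 [] (· ++ [q.2])) PySem.Dict.empty := by
    rw [PySem.List.foldl_if_eq_foldl_filter, List.foldl_map]
  rw [hreg, hdict]
  have hkeys : (((tv.filter pvCond).map (fun q => (pvParent q, (pvIdx q, q)))).foldl
        (fun d q => d.modify q.1 [] (· ++ [q.2])) PySem.Dict.empty).keys
      = PySem.Set.ofList ((tv.filter pvCond).map pvParent) := by
    rw [PySem.Dict.keys_foldl_modify_key]
    have h1 : (Prod.fst ∘ fun q => (pvParent q, pvIdx q, q)) = pvParent := rfl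
    simp only [PySem.Set.update, PySem.Set.ofList_eq_foldl, PySem.Dict.keys_empty,
      List.map_map, h1]
  have hgetD : ∀ p, (((tv.filter pvCond).map (fun q => (pvParent q, (pvIdx q, q)))).foldl
        (fun d q => d.modify q.1 [] (· ++ [q.2])) PySem.Dict.empty).getD p []
      = ((tv.filter pvCond).filter (fun q => pvParent q == p)).map (fun q => (pvIdx q, q)) := by
    intro p
    rw [PySem.Dict.getD_foldl_modify_append]
    rw [List.filter_map]
    simp [Function.comp, List.map_map]
  rw [hkeys]
  congr 1
  rw [PySem.List.foldl_congr_mem _ _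
    (fun acc p => acc ++
      (PySem.List.sorted (((tv.filter pvCond).filter (fun q => pvParent q == p)).map (fun q => (pvIdx q, q)))
        (fun x => x.1) true).map (fun x => x.2)) _
    (fun acc p _ => by rw [hgetD])]
  rw [PySem.List.foldl_append_eq_flatMap]
  simp

-- B's result in the same shape: regular paths ++ one composite-key stable sort
theorem pvB_eq (tv : List String) :
    sort_tracked_values_for_filtering_alt tv =
      tv.filter (fun p => !pvCond p) ++
      (PySem.List.sorted2 ((tv.filter pvCond).map pvTrip)
          (fun t => t.1) (fun t => t.2.1)).map (fun t => t.2.2) := by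
  simp only [sort_tracked_values_for_filtering_alt]
  rw [pvFilterMap_dec]
  congr 1
  apply List.filter_congr
  intro p _
  rw [pvDecorate_eq]
  cases h : pvCond p <;> simp [h]

-- per-parent: A's stable descending sort by index = B's ascending sort by -index
theorem pvBlock_eq (lp : List String) :
    (PySem.List.sorted (lp.map (fun q => (pvIdx q, q))) (fun x => x.1) true).map (fun x => x.2)
    = (PySem.List.sorted (lp.map pvTrip) (fun t => t.2.1)).map (fun t => t.2.2) := by
  have hleft : PySem.List.sorted (lp.map (fun q => (pvIdx q, q))) (fun x => x.1) true
      = (lp.foldl (fun a q => PySem.List.insertBy (fun q q' => decide (pvIdx q' < pvIdx q)) q a) []).map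
          (fun q => (pvIdx q, q)) := by
    show (lp.map (fun q => (pvIdx q, q))).foldl
        (fun a x => PySem.List.insertBy (fun u v => decide (v.1 < u.1)) x a)
        (([] : List String).map (fun q => (pvIdx q, q))) = _
    exact foldl_insertBy_map _ _ _ (fun x y => rfl) lp []
  have hright : PySem.List.sorted (lp.map pvTrip) (fun t => t.2.1)
      = (lp.foldl (fun a q => PySem.List.insertBy (fun q q' => decide (pvIdx q' < pvIdx q)) q a) []).map pvTrip := by
    show (lp.map pvTrip).foldl
        (fun a x => PySem.List.insertBy (fun u v => decide (u.2.1 < v.2.1)) x a)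
        (([] : List String).map pvTrip) = _
    exact foldl_insertBy_map _ _ _ (fun x y => by simp [pvTrip]) lp []
  rw [hleft, hright, List.map_map, List.map_map]
  rfl

theorem pvMain (tv : List String) :
    sort_tracked_values_for_filtering tv = sort_tracked_values_for_filtering_alt tv := by
  rw [pvA_eq, pvB_eq]
  congr 1
  rw [pvGP, List.map_flatMap]
  have hfst : ((tv.filter pvCond).map pvTrip).map (fun t => t.1)
      = (tv.filter pvCond).map pvParent := by
    rw [List.map_map]; rfl
  rw [hfst]
  rw [List.flatMap_def, List.flatMap_def]
  congr 1
  apply List.map_congr_left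
  intro p _
  rw [List.filter_map]
  have hc : ((fun (t : String × Int × String) => t.1 == p) ∘ pvTrip)
      = (fun q => pvParent q == p) := rfl
  rw [hc]
  exact pvBlock_eq _

-- ===== VERDICT (by name: the statement is the Claim_ definition above) =====
theorem sort_tracked_values_for_filtering_spec : Claim_equal_sort_tracked_values_for_filtering := by
  intro tv _
  exact (pvMain tv).symm ▸ rfl
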